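-- pv_equiv track=rewrite | github.com/wgergely/After-Effects | Maya/PipeUtility/ref/pipeCore/editUtils.py | _isTimeCode
-- ===== SOURCE A (Python) =====
-- def _isTimeCode(timeCode):
-- 	parts = timeCode.split(':')
-- 	if len(parts) != 4:
-- 		return False
-- 	for part in parts:
-- 		if len(part) != 2 or not part.isdigit():
-- 			return False
-- 	return True
-- ===== SOURCE B (Python) =====
-- def _isTimeCode(timeCode):
-- 	if len(timeCode) != 11:
-- 		return False
-- 	for i, ch in enumerate(timeCode):
-- 		if i in (2, 5, 8):
-- 			if ch != ':':
-- 				return False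
-- 		elif not ch.isdigit():
-- 			return False
-- 	return True
-- ===== Notes on version B (the rewrite author's own statement) =====
-- stated objective: alternative
-- what changed: Replaces split-on-colon plus a per-part length/isdigit scan by a single positional pass: length must be 11, the characters at indices 2, 5 and 8 must be colons, all others must satisfy isdigit.
import Mathlib
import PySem

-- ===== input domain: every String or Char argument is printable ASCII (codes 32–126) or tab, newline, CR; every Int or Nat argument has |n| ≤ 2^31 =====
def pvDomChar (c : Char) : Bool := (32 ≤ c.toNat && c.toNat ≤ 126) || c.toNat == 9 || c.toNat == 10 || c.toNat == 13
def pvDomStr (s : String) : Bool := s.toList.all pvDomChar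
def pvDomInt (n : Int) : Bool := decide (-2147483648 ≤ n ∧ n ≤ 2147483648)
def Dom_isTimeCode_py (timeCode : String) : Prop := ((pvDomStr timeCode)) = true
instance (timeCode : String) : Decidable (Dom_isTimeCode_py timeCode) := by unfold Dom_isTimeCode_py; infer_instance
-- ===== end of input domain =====

-- B replaces A's split-on-':' + per-part scan by a single positional pass over the
-- characters (length 11, ':' at indices 2/5/8, digits elsewhere); same cost, different decomposition.

-- ===== PORT A =====
-- parts = timeCode.split(':'); len(parts) == 4 and every part has len 2 and .isdigit()
def isTimeCode_py (timeCode : String) : Bool :=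
  let parts := PySem.Chars.splitOn timeCode.toList [':']
  if parts.length ≠ 4 then false
  else parts.all (fun part => ¬ (part.length ≠ 2 ∨ PySem.Chars.strIsdigit part = false))

-- ===== PORT B =====
-- len(timeCode) == 11 and a single indexed pass: ':' at 2,5,8, isdigit elsewhere
def isTimeCode_py_alt (timeCode : String) : Bool :=
  let cs := timeCode.toList
  if cs.length ≠ 11 then false
  else (PySem.List.enumerate cs 0).all (fun ic =>
    if ic.1 = 2 ∨ ic.1 = 5 ∨ ic.1 = 8 then ic.2 == ':'
    else PySem.Chars.isdigit ic.2)

-- ===== PRECONDITION & SPEC =====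
def Spec_isTimeCode_py (timeCode : String) (out : Bool) : Prop := out = isTimeCode_py_alt timeCode
instance (timeCode : String) (out : Bool) : Decidable (Spec_isTimeCode_py timeCode out) := by unfold Spec_isTimeCode_py; infer_instance

-- ===== CLAIM (what is proved, stated in full; the proofs are below) =====
def Claim_equal_isTimeCode_py : Prop := ∀ (timeCode : String), Dom_isTimeCode_py timeCode → Spec_isTimeCode_py timeCode (isTimeCode_py timeCode)

-- ===== LEMMAS AND PROOFS =====

-- reference splitter: what splitOn cs [':'] computes, by structural recursion
def splitColon : List Char → List (List Char)
  | [] => [[]]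
  | c :: rest => if c = ':' then [] :: splitColon rest else (splitColon rest).modifyHead (c :: ·)

theorem modifyHead_id' {α : Type} (l : List α) : l.modifyHead (fun x => x) = l := by
  cases l <;> simp

-- master lemma for splitOn.go with sep = [':']
theorem go_spec (fuel : Nat) : ∀ (l cur : List Char) (acc : List (List Char)), l.length < fuel →
    PySem.Chars.splitOn.go [':'] fuel l cur acc
      = acc.reverse ++ (splitColon l).modifyHead (cur.reverse ++ ·) := by
  induction fuel with
  | zero => intro l cur acc h; omega
  | succ n ih =>
    intro l cur acc h
    match l with
    | [] =>
      rw [PySem.Chars.splitOn.go]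
      simp [splitColon]
      all_goals omega
    | c :: rest =>
      by_cases hc : c = ':'
      · subst hc
        rw [PySem.Chars.splitOn.go]
        simp only [List.isPrefixOf, BEq.rfl, Bool.true_and, if_true,
          List.length_singleton, List.drop_one, List.tail_cons]
        rw [ih rest [] (List.reverse cur :: acc) (by simpa using h)]
        simp only [splitColon, if_true, List.reverse_cons, List.reverse_nil, List.nil_append,
          List.modifyHead_cons, List.append_assoc, List.singleton_append]
        simp [modifyHead_id']
      · rw [PySem.Chars.splitOn.go]
        have hpre : List.isPrefixOf [':'] (c :: rest) = false := by
          simp [List.isPrefixOf]; exact fun h' => absurd h'.symm hc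
        rw [hpre]
        simp only [Bool.false_eq_true, if_false]
        rw [ih rest (c :: cur) acc (by simpa using h)]
        simp only [splitColon, hc, if_false, List.reverse_cons]
        rw [List.modifyHead_modifyHead]
        have hf : ((fun x => cur.reverse ++ x) ∘ fun x => c :: x)
            = fun x : List Char => cur.reverse ++ [c] ++ x := by
          funext x; simp
        rw [hf]

theorem splitOn_eq (cs : List Char) : PySem.Chars.splitOn cs [':'] = splitColon cs := by
  rw [PySem.Chars.splitOn, go_spec (cs.length + 1) cs [] [] (by omega)]
  simp [modifyHead_id']

theorem splitOn_nil : PySem.Chars.splitOn [] [':'] = [[]] := by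
  rw [splitOn_eq]; rfl

theorem splitOn_cons_sep (rest : List Char) :
    PySem.Chars.splitOn (':' :: rest) [':'] = [] :: PySem.Chars.splitOn rest [':'] := by
  rw [splitOn_eq, splitOn_eq]; simp [splitColon]

theorem splitOn_cons_ne (c : Char) (rest : List Char) (hc : c ≠ ':') :
    PySem.Chars.splitOn (c :: rest) [':']
      = (PySem.Chars.splitOn rest [':']).modifyHead (c :: ·) := by
  rw [splitOn_eq, splitOn_eq]; simp [splitColon, hc]

theorem splitOn_ne_nil (cs : List Char) : PySem.Chars.splitOn cs [':'] ≠ [] := by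
  induction cs with
  | nil => simp [splitOn_nil]
  | cons c rest ih =>
    by_cases hc : c = ':'
    · subst hc; simp [splitOn_cons_sep]
    · rw [splitOn_cons_ne c rest hc]
      intro h
      apply ih
      have := congrArg List.length h
      simpa using List.length_eq_zero_iff.mp (by simpa using this)

theorem join_splitOn (cs : List Char) :
    PySem.Chars.join [':'] (PySem.Chars.splitOn cs [':']) = cs := by
  induction cs with
  | nil => rw [splitOn_nil, PySem.Chars.join_singleton]
  | cons c rest ih =>
    rcases h : PySem.Chars.splitOn rest [':'] with _ | ⟨p, ps⟩
    · exact absurd h (splitOn_ne_nil rest)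
    rw [h] at ih
    by_cases hc : c = ':'
    · subst hc
      rw [splitOn_cons_sep, h, PySem.Chars.join_cons_cons, ih]
      simp
    · rw [splitOn_cons_ne c rest hc, h, List.modifyHead_cons]
      rcases ps with _ | ⟨q, qs⟩
      · rw [PySem.Chars.join_singleton] at ih
        rw [PySem.Chars.join_singleton, ih]
      · rw [PySem.Chars.join_cons_cons] at ih
        rw [PySem.Chars.join_cons_cons, ← ih]
        simp

theorem ne_colon_of_isdigit {c : Char} (h : PySem.Chars.isdigit c = true) : c ≠ ':' := by
  simp [PySem.Chars.isdigit] at h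
  intro hc; subst hc
  exact absurd h.2 (by decide)

-- a length-2 digit part is [x, y] with both digits
theorem part_shape {p : List Char} (h2 : p.length = 2) (hd : PySem.Chars.strIsdigit p = true) :
    ∃ x y, p = [x, y] ∧ PySem.Chars.isdigit x = true ∧ PySem.Chars.isdigit y = true := by
  match p, h2 with
  | [x, y], _ =>
    have h' : PySem.Chars.isdigit x = true ∧ PySem.Chars.isdigit y = true := by
      simpa [PySem.Chars.strIsdigit] using hd
    exact ⟨x, y, rfl, h'.1, h'.2⟩

theorem isTimeCode_main (timeCode : String) :
    isTimeCode_py timeCode = isTimeCode_py_alt timeCode := by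
  unfold isTimeCode_py isTimeCode_py_alt
  set cs := timeCode.toList with hcs
  clear hcs
  by_cases hA : (if (PySem.Chars.splitOn cs [':']).length ≠ 4 then false
      else (PySem.Chars.splitOn cs [':']).all
        (fun part => ¬ (part.length ≠ 2 ∨ PySem.Chars.strIsdigit part = false))) = true
  · -- A true: extract the shape, then compute B
    rw [hA]
    split_ifs at hA with h4
    push Not at h4
    rcases hp : PySem.Chars.splitOn cs [':'] with _ | ⟨p1, rest1⟩
    · exact absurd hp (splitOn_ne_nil cs)
    rcases rest1 with _ | ⟨p2, rest2⟩
    · rw [hp] at h4; simp at h4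
    rcases rest2 with _ | ⟨p3, rest3⟩
    · rw [hp] at h4; simp at h4
    rcases rest3 with _ | ⟨p4, rest4⟩
    · rw [hp] at h4; simp at h4
    rcases rest4 with _ | ⟨p5, rest5⟩
    swap
    · rw [hp] at h4; simp at h4
    rw [hp] at hA
    simp only [List.all_cons, List.all_nil, Bool.and_true, Bool.and_eq_true,
      decide_eq_true_eq, not_or, Bool.not_eq_false] at hA
    obtain ⟨⟨l1, d1⟩, ⟨l2, d2⟩, ⟨l3, d3⟩, ⟨l4, d4⟩⟩ := hA
    obtain ⟨a, b, rfl, da, db⟩ := part_shape (by omega) d1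
    obtain ⟨c, d, rfl, dc, dd⟩ := part_shape (by omega) d2
    obtain ⟨e, f, rfl, de, df⟩ := part_shape (by omega) d3
    obtain ⟨g, h, rfl, dg, dh⟩ := part_shape (by omega) d4
    have hcseq : cs = [a, b, ':', c, d, ':', e, f, ':', g, h] := by
      rw [← join_splitOn cs, hp]
      rw [PySem.Chars.join_cons_cons, PySem.Chars.join_cons_cons,
        PySem.Chars.join_cons_cons, PySem.Chars.join_singleton]
      simp
    rw [hcseq]
    simp [PySem.List.enumerate, da, db, dc, dd, de, df, dg, dh]
  · -- A false: show B false too (B true would force the shape making A true)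
    rw [Bool.not_eq_true] at hA
    rw [hA]
    by_cases hB : (if cs.length ≠ 11 then false
        else (PySem.List.enumerate cs 0).all (fun ic =>
          if ic.1 = 2 ∨ ic.1 = 5 ∨ ic.1 = 8 then ic.2 == ':'
          else PySem.Chars.isdigit ic.2)) = true
    · exfalso
      split_ifs at hB with h11
      push Not at h11
      match cs, h11 with
      | [a, b, c2, c, d, c5, e, f, c8, g, h], _ =>
        simp only [PySem.List.enumerate, List.all_cons, List.all_nil, Bool.and_true,
          Bool.and_eq_true] at hB
        norm_num at hB
        obtain ⟨da, db, h2, dc, dd, h5, de, df, h8, dg, dh⟩ := hB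
        subst h2; subst h5; subst h8
        rw [splitOn_cons_ne a _ (ne_colon_of_isdigit da),
          splitOn_cons_ne b _ (ne_colon_of_isdigit db),
          splitOn_cons_sep,
          splitOn_cons_ne c _ (ne_colon_of_isdigit dc),
          splitOn_cons_ne d _ (ne_colon_of_isdigit dd),
          splitOn_cons_sep,
          splitOn_cons_ne e _ (ne_colon_of_isdigit de),
          splitOn_cons_ne f _ (ne_colon_of_isdigit df),
          splitOn_cons_sep,
          splitOn_cons_ne g _ (ne_colon_of_isdigit dg),
          splitOn_cons_ne h _ (ne_colon_of_isdigit dh),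
          splitOn_nil] at hA
        simp [PySem.Chars.strIsdigit, PySem.Chars.isdigit] at hA
        simp [PySem.Chars.isdigit] at da db dc dd de df dg dh
        exact absurd (hA da.1 da.2 db.1 db.2 dc.1 dc.2 dd.1 dd.2 de.1 de.2
          df.1 df.2 dg.1 dg.2 dh.1) (not_lt.mpr dh.2)
    · rw [Bool.not_eq_true] at hB
      exact hB.symm

-- ===== VERDICT (by name: the statement is the Claim_ definition above) =====
theorem isTimeCode_py_spec : Claim_equal_isTimeCode_py := by
  intro timeCode _
  unfold Spec_isTimeCode_py
  exact isTimeCode_main timeCode
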